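-- pv_equiv track=rewrite | github.com/nathanpaulscott/CausalRE | CRE Model/modules/post processing utils/merge pred results review with the pred json.py | apply_inserts
-- ===== SOURCE A (Python) =====
-- def apply_inserts(tokens):
--     output = []
--     for idx, token in enumerate(tokens):
--         if token in {'.', ',', '?', '!', ';', ':'} and idx > 0:
--             output[-1] = output[-1] + token
--         else:
--             output.append(token)
--     return " ".join(output)
-- ===== SOURCE B (Python) =====
-- PUNCT = {'.', ',', '?', '!', ';', ':'}
--
-- def apply_inserts(tokens):
--     if not tokens:
--         return ''
--     return tokens[0] + ''.join(('' if t in PUNCT else ' ') + t for t in tokens[1:])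
-- ===== Notes on version B (the rewrite author's own statement) =====
-- stated objective: simpler
-- what changed: Instead of mutating a list (merging punctuation into its last cell) and joining at the end, B picks the separator per token ('' for punctuation, ' ' otherwise) and builds the string directly with one join over the tail.
import Mathlib
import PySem

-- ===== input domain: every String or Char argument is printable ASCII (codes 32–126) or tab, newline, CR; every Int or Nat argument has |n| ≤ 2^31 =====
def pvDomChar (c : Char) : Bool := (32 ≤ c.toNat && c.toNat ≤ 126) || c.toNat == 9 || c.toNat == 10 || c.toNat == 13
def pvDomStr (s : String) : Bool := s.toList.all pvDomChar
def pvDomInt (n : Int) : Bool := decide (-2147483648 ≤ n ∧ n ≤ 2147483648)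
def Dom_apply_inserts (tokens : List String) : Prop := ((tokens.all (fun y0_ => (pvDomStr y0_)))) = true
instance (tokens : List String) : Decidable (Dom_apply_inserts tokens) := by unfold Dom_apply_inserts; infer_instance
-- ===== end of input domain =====

-- B is simpler: it chooses a separator per token ('' for punctuation, ' ' otherwise) and joins once,
-- instead of A's list mutation (merging punctuation into the last cell) followed by a join.

-- token in {'.', ',', '?', '!', ';', ':'}  (shared punctuation-membership helper)
def pvIsPunct (t : String) : Bool :=
  t ∈ PySem.Set.ofList [".", ",", "?", "!", ";", ":"]

-- ===== PORT A =====
-- A's loop body: merge a punctuation token (at idx > 0) into the last output cell, else append.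
-- 'output[-1] = output[-1] + token' is exact here: output is nonempty whenever idx > 0
-- (the first iteration always appends), so Python's IndexError branch is unreachable.
def pvStepA (output : List String) (p : Int × String) : List String :=
  if pvIsPunct p.2 && decide (p.1 > 0) then
    output.dropLast ++ [(output.getLast?.getD "") ++ p.2]
  else
    output ++ [p.2]

def apply_inserts (tokens : List String) : String :=
  PySem.Str.join " " ((PySem.List.enumerate tokens).foldl pvStepA [])

-- ===== PORT B =====
-- B's per-token piece for the tail: ('' if t in PUNCT else ' ') + t
def pvPieceB (t : String) : String := (if pvIsPunct t then "" else " ") ++ t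

def apply_inserts_alt (tokens : List String) : String :=
  match tokens with
  | [] => ""
  | t0 :: rest => t0 ++ PySem.Str.join "" (rest.map pvPieceB)

-- ===== PRECONDITION & SPEC =====
def Spec_apply_inserts (tokens : List String) (out : String) : Prop := out = apply_inserts_alt tokens
instance (tokens : List String) (out : String) : Decidable (Spec_apply_inserts tokens out) := by unfold Spec_apply_inserts; infer_instance

-- ===== CLAIM (what is proved, stated in full; the proofs are below) =====
def Claim_equal_apply_inserts : Prop := ∀ (tokens : List String), Dom_apply_inserts tokens → Spec_apply_inserts tokens (apply_inserts tokens)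

-- ===== LEMMAS AND PROOFS =====

-- join with a nonempty tail (char level)
theorem pv_join_cons {sep a : List Char} {l : List (List Char)} (h : l ≠ []) :
    PySem.Chars.join sep (a :: l) = a ++ sep ++ PySem.Chars.join sep l := by
  cases l with
  | nil => exact absurd rfl h
  | cons b l' => simp [PySem.Chars.join_cons_cons]

-- toList of a join of strings
theorem pv_toList_join (sep : String) (l : List String) :
    (PySem.Str.join sep l).toList = PySem.Chars.join sep.toList (l.map String.toList) := by
  simp [PySem.Str.toList_join]

-- toList of a join with a nonempty tail (string level)
theorem pv_toList_join_cons (sep x : String) (L : List String) (h : L ≠ []) :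
    (PySem.Str.join sep (x :: L)).toList
      = x.toList ++ sep.toList ++ (PySem.Str.join sep L).toList := by
  rw [pv_toList_join, pv_toList_join, List.map_cons]
  exact pv_join_cons (by simpa using h)

-- toList of an empty-separator join distributes over cons unconditionally
theorem pv_toList_join_empty_cons (x : String) (L : List String) :
    (PySem.Str.join "" (x :: L)).toList = x.toList ++ (PySem.Str.join "" L).toList := by
  cases L with
  | nil =>
      rw [pv_toList_join, pv_toList_join]
      simp [PySem.Chars.join_singleton, PySem.Chars.join_nil]
  | cons y L' =>
      rw [pv_toList_join_cons "" x (y :: L') (by simp)]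
      simp

-- replacing the last element x by x ++ t appends t after the join
theorem pv_join_set_last (t : String) :
    ∀ (x : String) (l : List String),
      (PySem.Str.join " " ((x :: l).dropLast ++ [((x :: l).getLast?.getD "") ++ t])).toList
        = (PySem.Str.join " " (x :: l)).toList ++ t.toList := by
  intro x l
  induction l generalizing x with
  | nil => simp [PySem.Chars.join_singleton]
  | cons y l' ih =>
      have h1 : ((x :: y :: l').dropLast ++ [((x :: y :: l').getLast?.getD "") ++ t])
          = x :: ((y :: l').dropLast ++ [((y :: l').getLast?.getD "") ++ t]) := by
        simp [List.dropLast]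
      rw [h1, pv_toList_join_cons _ _ _ (by simp), ih,
          pv_toList_join_cons " " x (y :: l') (by simp)]
      simp [List.append_assoc]

-- appending a new element appends ' ' ++ t after the join
theorem pv_join_snoc (t : String) :
    ∀ (x : String) (l : List String),
      (PySem.Str.join " " ((x :: l) ++ [t])).toList
        = (PySem.Str.join " " (x :: l)).toList ++ " ".toList ++ t.toList := by
  intro x l
  induction l generalizing x with
  | nil =>
      rw [show (x :: []) ++ [t] = x :: [t] by simp,
          pv_toList_join_cons " " x [t] (by simp)]
      simp [PySem.Chars.join_singleton]
  | cons y l' ih =>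
      rw [show ((x :: y :: l') ++ [t]) = x :: ((y :: l') ++ [t]) by simp,
          pv_toList_join_cons " " x ((y :: l') ++ [t]) (by simp), ih,
          pv_toList_join_cons " " x (y :: l') (by simp)]
      simp [List.append_assoc]

-- main invariant: folding A's loop over an enumerated tail (all indices ≥ 1)
theorem pv_main (rest : List String) :
    ∀ (x : String) (l : List String) (k : Int), 1 ≤ k →
      (PySem.Str.join " " ((PySem.List.enumerate rest k).foldl pvStepA (x :: l))).toList
        = (PySem.Str.join " " (x :: l)).toList
          ++ (PySem.Str.join "" (rest.map pvPieceB)).toList := by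
  induction rest with
  | nil => intro x l k _; simp [PySem.List.enumerate_nil, PySem.Chars.join_nil]
  | cons t rest ih =>
      intro x l k hk
      rw [PySem.List.enumerate_cons, List.foldl_cons]
      have hk1 : (1 : Int) ≤ k + 1 := by omega
      by_cases hp : pvIsPunct t
      · have hstep : pvStepA (x :: l) (k, t)
            = (x :: l).dropLast ++ [((x :: l).getLast?.getD "") ++ t] := by
          unfold pvStepA
          rw [if_pos]; simp [hp]; omega
        obtain ⟨y, l', hyl⟩ : ∃ y l',
            (x :: l).dropLast ++ [((x :: l).getLast?.getD "") ++ t] = y :: l' := by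
          cases h : (x :: l).dropLast with
          | nil => exact ⟨_, _, rfl⟩
          | cons a b => exact ⟨_, _, rfl⟩
        rw [hstep, hyl, ih y l' (k + 1) hk1, ← hyl, pv_join_set_last,
            List.map_cons, pv_toList_join_empty_cons]
        simp [pvPieceB, hp, List.append_assoc]
      · have hstep : pvStepA (x :: l) (k, t) = (x :: l) ++ [t] := by
          unfold pvStepA
          rw [if_neg]; simp [hp]
        rw [hstep, show (x :: l) ++ [t] = x :: (l ++ [t]) by simp,
            ih x (l ++ [t]) (k + 1) hk1,
            show x :: (l ++ [t]) = (x :: l) ++ [t] by simp, pv_join_snoc,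
            List.map_cons, pv_toList_join_empty_cons]
        simp [pvPieceB, hp, List.append_assoc]

-- ===== VERDICT (by name: the statement is the Claim_ definition above) =====
theorem apply_inserts_spec : Claim_equal_apply_inserts := by
  intro tokens _
  unfold Spec_apply_inserts apply_inserts apply_inserts_alt
  cases tokens with
  | nil =>
      apply String.toList_injective
      simp [PySem.List.enumerate_nil, PySem.Chars.join_nil]
  | cons t0 rest =>
      apply String.toList_injective
      rw [PySem.List.enumerate_cons, List.foldl_cons]
      have hfirst : pvStepA [] ((0 : Int), t0) = [t0] := by
        unfold pvStepA; simp
      rw [hfirst, show (0 : Int) + 1 = 1 by norm_num, pv_main rest t0 [] 1 (le_refl 1),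
          pv_toList_join " " [t0]]
      simp [PySem.Chars.join_singleton]
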